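-- pv_equiv track=rewrite | github.com/AI-IshanBhatt/PythonFAANG | AOC/aoc_6.py | with_binary_search
-- ===== SOURCE A (Python) =====
-- def with_binary_search(times, distances):
--     low, high = 1, times
--
--     # Moving to left
--     while low < high:
--         mid = (high + low) // 2
--         distance_travel = mid * (times - mid)
--
--         if distance_travel > distances:
--             high = mid
--         else:
--             low = mid + 1
--
--     left_side = high
--
--     low, high = 1, times
--     while low < high:
--         mid = (high + low) // 2
--         distance_travel = mid * (times - mid)
--
--         if distance_travel > distances:
--             low = mid + 1
--         else:
--             high = mid
--
--     return left_side, high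
-- ===== SOURCE B (Python) =====
-- def _isqrt(n):
--     if n == 0:
--         return 0
--     x = n
--     y = (x + 1) // 2
--     while y < x:
--         x = y
--         y = (x + n // x) // 2
--     return x
--
--
-- def with_binary_search(times, distances):
--     if times <= 1:
--         return times, times
--     half = times // 2
--     if half * (times - half) <= distances:
--         return times, 1
--     disc = times * times - 4 * distances
--     s = _isqrt(disc)
--     l = (times - s) // 2 + 1
--     if (l - 1) * (times - l + 1) > distances:
--         l -= 1
--     first = l if l > 1 else 1
--     second = times - l + 1 if times - l + 1 < times else times
--     return first, second
-- ===== Notes on version B (the rewrite author's own statement) =====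
-- stated objective: alternative
-- what changed: Replaces A's two binary searches over mid with a closed-form solution of the quadratic mid*(times-mid) > distances: a hand-rolled Newton integer square root of the discriminant times^2-4*distances gives the lower root, corrected by one integer test, and the right endpoint follows by symmetry.
import Mathlib
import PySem

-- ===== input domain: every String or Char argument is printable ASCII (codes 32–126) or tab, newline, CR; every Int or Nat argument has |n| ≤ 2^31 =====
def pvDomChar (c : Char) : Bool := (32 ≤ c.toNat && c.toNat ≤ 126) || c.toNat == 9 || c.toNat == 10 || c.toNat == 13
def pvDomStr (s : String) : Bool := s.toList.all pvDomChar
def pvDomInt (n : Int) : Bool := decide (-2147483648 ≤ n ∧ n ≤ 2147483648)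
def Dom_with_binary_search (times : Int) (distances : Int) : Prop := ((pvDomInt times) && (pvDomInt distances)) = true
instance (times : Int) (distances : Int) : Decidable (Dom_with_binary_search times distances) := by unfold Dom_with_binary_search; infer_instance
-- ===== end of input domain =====

-- B replaces A's two binary searches by a closed-form quadratic-root computation (hand-rolled Newton
-- integer square root of the discriminant, plus an off-by-one correction); objective: alternative.

-- ===== PORT A =====
-- first while-loop of A: moves `high` left onto the first winning mid.
-- `fuel` is a totality guard only: the gap high - low shrinks every iteration, so fuel = (high - low).toNat
-- iterations always suffice to reach low = high, exactly as Python's `while low < high` does.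
-- (Python's local `mid = (high + low) // 2` is inlined.)
def wbsLoop1 (times distances : Int) : Nat → Int → Int → Int
  | 0, _, high => high
  | fuel + 1, low, high =>
    if low < high then
      if (PySem.Int.floordiv (high + low) 2) * (times - PySem.Int.floordiv (high + low) 2) > distances then
        wbsLoop1 times distances fuel low (PySem.Int.floordiv (high + low) 2)
      else
        wbsLoop1 times distances fuel (PySem.Int.floordiv (high + low) 2 + 1) high
    else high

-- second while-loop of A: moves `low` right past the last winning mid
def wbsLoop2 (times distances : Int) : Nat → Int → Int → Int
  | 0, _, high => high
  | fuel + 1, low, high =>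
    if low < high then
      if (PySem.Int.floordiv (high + low) 2) * (times - PySem.Int.floordiv (high + low) 2) > distances then
        wbsLoop2 times distances fuel (PySem.Int.floordiv (high + low) 2 + 1) high
      else
        wbsLoop2 times distances fuel low (PySem.Int.floordiv (high + low) 2)
    else high

def with_binary_search (times : Int) (distances : Int) : Int × Int :=
  let left_side := wbsLoop1 times distances (times - 1).toNat 1 times
  (left_side, wbsLoop2 times distances (times - 1).toNat 1 times)

-- ===== PORT B =====
-- Newton iteration of Source B's _isqrt; fuel is a totality guard only (Source B calls _isqrt with n ≥ 1,
-- where x strictly decreases and stays ≥ 1, so n.toNat iterations always suffice)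
def altNewtonLoop (n : Int) : Nat → Int → Int → Int
  | 0, x, _ => x
  | fuel + 1, x, y =>
    if y < x then
      altNewtonLoop n fuel y (PySem.Int.floordiv (y + PySem.Int.floordiv n y) 2)
    else x

-- Source B's _isqrt
def altIsqrt (n : Int) : Int :=
  if n = 0 then 0
  else altNewtonLoop n n.toNat n (PySem.Int.floordiv (n + 1) 2)

def with_binary_search_alt (times : Int) (distances : Int) : Int × Int :=
  if times ≤ 1 then (times, times)
  else
    let half := PySem.Int.floordiv times 2
    if half * (times - half) ≤ distances then (times, 1)
    else
      let disc := times * times - 4 * distances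
      let s := altIsqrt disc
      let l0 := PySem.Int.floordiv (times - s) 2 + 1
      let l := if (l0 - 1) * (times - l0 + 1) > distances then l0 - 1 else l0
      (if l > 1 then l else 1, if times - l + 1 < times then times - l + 1 else times)

-- ===== PRECONDITION & SPEC =====
def Spec_with_binary_search (times : Int) (distances : Int) (out : Int × Int) : Prop := out = with_binary_search_alt times distances
instance (times : Int) (distances : Int) (out : Int × Int) : Decidable (Spec_with_binary_search times distances out) := by unfold Spec_with_binary_search; infer_instance

-- ===== CLAIM (what is proved, stated in full; the proofs are below) =====
def Claim_equal_with_binary_search : Prop := ∀ (times : Int) (distances : Int), Dom_with_binary_search times distances → Spec_with_binary_search times distances (with_binary_search times distances)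

-- ===== LEMMAS AND PROOFS =====

theorem pvFd2 (a : Int) : 2 * PySem.Int.floordiv a 2 ≤ a ∧ a < 2 * PySem.Int.floordiv a 2 + 2 := by
  have h := PySem.Int.floordiv_mul_add_mod a 2
  have h1 : 0 ≤ PySem.Int.mod a 2 := PySem.Int.mod_nonneg a (by norm_num)
  have h2 : PySem.Int.mod a 2 < 2 := PySem.Int.mod_lt a (by norm_num)
  omega

theorem pvMidBounds (low high : Int) (h : low < high) :
    low ≤ PySem.Int.floordiv (high + low) 2 ∧ PySem.Int.floordiv (high + low) 2 < high := by
  have := pvFd2 (high + low); omega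

-- the travelled distance m*(t-m) is concave in m: winners form an interval
theorem pvConcave (t d a b m : Int) (hab : a ≤ m) (hmb : m ≤ b)
    (ha : a * (t - a) > d) (hb : b * (t - b) > d) : m * (t - m) > d := by
  by_contra h
  push_neg at h
  have h1 : (a - m) * (t - a - m) > 0 := by nlinarith
  have h2 : (b - m) * (t - b - m) > 0 := by nlinarith
  rcases mul_pos_iff.1 h1 with ⟨c1, c2⟩ | ⟨c1, c2⟩
  · omega
  · rcases mul_pos_iff.1 h2 with ⟨e1, e2⟩ | ⟨e1, e2⟩
    · omega
    · omega

-- the midpoint ⌊t/2⌋ maximises m*(t-m)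
theorem pvMaxAtHalf (t half m : Int) (h1 : 2 * half ≤ t) (h2 : t < 2 * half + 2) :
    m * (t - m) ≤ half * (t - half) := by
  nlinarith [sq_nonneg (half - m), sq_nonneg (half - m + 1)]

-- loop lemmas (all by induction on the fuel, which bounds the gap high - low)
theorem pvLoop1_allFalse (t d : Int) (hall : ∀ m : Int, m * (t - m) ≤ d) :
    ∀ (fuel : Nat) (low high : Int), (high - low).toNat ≤ fuel → low ≤ high →
      wbsLoop1 t d fuel low high = high := by
  intro fuel
  induction fuel with
  | zero => intro low high _ _; rfl
  | succ f ih =>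
    intro low high hk hle
    simp only [wbsLoop1]
    split
    · next hlt =>
      have hm := pvMidBounds low high hlt
      rw [if_neg (by have := hall (PySem.Int.floordiv (high + low) 2); omega)]
      exact ih _ _ (by omega) (by omega)
    · rfl

theorem pvLoop2_allFalse (t d : Int) (hall : ∀ m : Int, m * (t - m) ≤ d) :
    ∀ (fuel : Nat) (low high : Int), (high - low).toNat ≤ fuel → low ≤ high →
      wbsLoop2 t d fuel low high = low := by
  intro fuel
  induction fuel with
  | zero => intro low high h1 h2; have : low = high := by omega
            subst this; rfl
  | succ f ih =>
    intro low high hk hle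
    simp only [wbsLoop2]
    split
    · next hlt =>
      have hm := pvMidBounds low high hlt
      rw [if_neg (by have := hall (PySem.Int.floordiv (high + low) 2); omega)]
      exact ih _ _ (by omega) (by omega)
    · next hnlt => omega

theorem pvLoop1_allTrue (t d : Int) :
    ∀ (fuel : Nat) (low high : Int), (high - low).toNat ≤ fuel → low ≤ high →
      (∀ m : Int, low ≤ m → m < high → m * (t - m) > d) →
      wbsLoop1 t d fuel low high = low := by
  intro fuel
  induction fuel with
  | zero => intro low high h1 h2 _; have : low = high := by omega
            subst this; rfl
  | succ f ih =>
    intro low high hk hle hall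
    simp only [wbsLoop1]
    split
    · next hlt =>
      have hm := pvMidBounds low high hlt
      rw [if_pos (hall _ (by omega) (by omega))]
      exact ih _ _ (by omega) (by omega) (fun m h1 h2 => hall m h1 (by omega))
    · next hnlt => omega

theorem pvLoop2_allTrue (t d : Int) :
    ∀ (fuel : Nat) (low high : Int), (high - low).toNat ≤ fuel → low ≤ high →
      (∀ m : Int, low ≤ m → m < high → m * (t - m) > d) →
      wbsLoop2 t d fuel low high = high := by
  intro fuel
  induction fuel with
  | zero => intro low high _ _ _; rfl
  | succ f ih =>
    intro low high hk hle hall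
    simp only [wbsLoop2]
    split
    · next hlt =>
      have hm := pvMidBounds low high hlt
      rw [if_pos (hall _ (by omega) (by omega))]
      exact ih _ _ (by omega) (by omega) (fun m h1 h2 => hall m (by omega) h2)
    · rfl

-- exit state of A's first loop: low = high, p(high), everything in [1, low) fails ⇒ high = l
theorem pvLoop1_exit (t d l low high : Int) (hl : l * (t - l) > d) (hl1 : 1 ≤ l)
    (hlow : ∀ m : Int, m < l → m * (t - m) ≤ d)
    (heq : low = high) (hph : high * (t - high) > d)
    (hfalse : ∀ m : Int, 1 ≤ m → m < low → m * (t - m) ≤ d) : high = l := by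
  have e1 : l ≤ high := by
    by_contra hc
    push_neg at hc
    have := hlow high hc
    omega
  have e2 : ¬ l < high := by
    intro hc
    have := hfalse l hl1 (by omega)
    omega
  omega

-- invariant for A's first loop: once p(high) holds and everything left of low fails,
-- the loop converges to the least winner l
theorem pvLoop1_inv (t d l : Int) (hl : l * (t - l) > d) (hl1 : 1 ≤ l)
    (hlow : ∀ m : Int, m < l → m * (t - m) ≤ d) :
    ∀ (fuel : Nat) (low high : Int), (high - low).toNat ≤ fuel →
      1 ≤ low → low ≤ high → high * (t - high) > d →
      (∀ m : Int, 1 ≤ m → m < low → m * (t - m) ≤ d) →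
      wbsLoop1 t d fuel low high = l := by
  intro fuel
  induction fuel with
  | zero =>
    intro low high hk h1low hle hph hfalse
    exact pvLoop1_exit t d l low high hl hl1 hlow (by omega) hph hfalse
  | succ f ih =>
    intro low high hk h1low hle hph hfalse
    simp only [wbsLoop1]
    split
    · next hlt =>
      have hm := pvMidBounds low high hlt
      by_cases hp : (PySem.Int.floordiv (high + low) 2) * (t - PySem.Int.floordiv (high + low) 2) > d
      · rw [if_pos hp]
        exact ih _ _ (by omega) h1low (by omega) hp hfalse
      · rw [if_neg hp]
        apply ih _ _ (by omega) (by omega) (by omega) hph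
        intro m hm1 hmlt
        by_contra hpm
        push_neg at hpm
        exact hp (pvConcave t d m high _ (by omega) (by omega) hpm hph)
    · next hnlt =>
      exact pvLoop1_exit t d l low high hl hl1 hlow (by omega) hph hfalse

-- exit state of A's second loop: low = high, p(low-1), everything in [high, t] fails ⇒ high = t - l + 1
theorem pvLoop2_exit (t d l low high : Int) (hl : l * (t - l) > d) (hl1 : 1 ≤ l)
    (hhigh : ∀ m : Int, t - l < m → m * (t - m) ≤ d)
    (heq : low = high) (hht : high ≤ t) (hplow : (low - 1) * (t - (low - 1)) > d)
    (hfalse : ∀ m : Int, high ≤ m → m ≤ t → m * (t - m) ≤ d) : high = t - l + 1 := by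
  subst heq
  have e1 : low - 1 ≤ t - l := by
    by_contra hc
    push_neg at hc
    have := hhigh (low - 1) (by omega)
    omega
  have e2 : ¬ low ≤ t - l := by
    intro hc
    have hpl : (t - l) * (t - (t - l)) > d := by nlinarith [hl]
    have := hfalse (t - l) hc (by omega)
    omega
  omega

-- invariant for A's second loop: p(low-1) holds and everything in [high, t] fails;
-- the loop converges to t - l + 1 (one past the last winner)
theorem pvLoop2_inv (t d l : Int) (hl : l * (t - l) > d) (hl1 : 1 ≤ l)
    (hhigh : ∀ m : Int, t - l < m → m * (t - m) ≤ d) :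
    ∀ (fuel : Nat) (low high : Int), (high - low).toNat ≤ fuel →
      low ≤ high → high ≤ t → (low - 1) * (t - (low - 1)) > d →
      (∀ m : Int, high ≤ m → m ≤ t → m * (t - m) ≤ d) →
      wbsLoop2 t d fuel low high = t - l + 1 := by
  intro fuel
  induction fuel with
  | zero =>
    intro low high hk hle hht hplow hfalse
    exact pvLoop2_exit t d l low high hl hl1 hhigh (by omega) hht hplow hfalse
  | succ f ih =>
    intro low high hk hle hht hplow hfalse
    simp only [wbsLoop2]
    split
    · next hlt =>
      have hm := pvMidBounds low high hlt
      by_cases hp : (PySem.Int.floordiv (high + low) 2) * (t - PySem.Int.floordiv (high + low) 2) > d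
      · rw [if_pos hp]
        apply ih _ _ (by omega) (by omega) hht ?_ hfalse
        have he : PySem.Int.floordiv (high + low) 2 + 1 - 1 = PySem.Int.floordiv (high + low) 2 := by ring
        rw [he]
        exact hp
      · rw [if_neg hp]
        apply ih _ _ (by omega) (by omega) (by omega) hplow
        intro m hmge hmt
        by_contra hpm
        push_neg at hpm
        exact hp (pvConcave t d (low - 1) m _ (by omega) (by omega) hplow hpm)
    · next hnlt =>
      exact pvLoop2_exit t d l low high hl hl1 hhigh (by omega) hht hplow hfalse

-- AM–GM step of Newton's iteration: the next iterate stays ≥ ⌊√n⌋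
theorem pvNewtonStep (n x s : Int) (hn : 1 ≤ n) (hx : 1 ≤ x) (hs : 0 ≤ s) (hsn : s * s ≤ n) :
    s ≤ PySem.Int.floordiv (x + PySem.Int.floordiv n x) 2 := by
  have hq := PySem.Int.floordiv_mul_add_mod n x
  have hq1 : 0 ≤ PySem.Int.mod n x := PySem.Int.mod_nonneg n (by omega)
  have hq2 : PySem.Int.mod n x < x := PySem.Int.mod_lt n (by omega)
  by_contra hcon
  push_neg at hcon
  rw [PySem.Int.floordiv_lt_iff_lt_mul (by norm_num)] at hcon
  have h5 : PySem.Int.floordiv n x ≤ 2 * s - x - 1 := by omega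
  have h6 : PySem.Int.floordiv n x * x ≤ (2 * s - x - 1) * x :=
    mul_le_mul_of_nonneg_right h5 (by omega)
  nlinarith [sq_nonneg (s - x)]

theorem pvNewtonLoop_correct (n : Int) (hn : 1 ≤ n) :
    ∀ (fuel : Nat) (x y : Int), x.toNat ≤ fuel → 1 ≤ x →
      y = PySem.Int.floordiv (x + PySem.Int.floordiv n x) 2 →
      (∀ s : Int, 0 ≤ s → s * s ≤ n → s ≤ x) →
      1 ≤ altNewtonLoop n fuel x y ∧ altNewtonLoop n fuel x y * altNewtonLoop n fuel x y ≤ n ∧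
        n < (altNewtonLoop n fuel x y + 1) * (altNewtonLoop n fuel x y + 1) := by
  intro fuel
  induction fuel with
  | zero => intro x y hk hx _ _; exact absurd hx (by omega)
  | succ f ih =>
    intro x y hk hx hy hinv
    have hy1 : 1 ≤ y := by
      have h1 := pvNewtonStep n x 1 hn hx (by norm_num) (by nlinarith)
      rw [← hy] at h1
      exact h1
    simp only [altNewtonLoop]
    split
    · next hyx =>
      apply ih y _ (by omega) hy1 rfl
      intro s hs0 hsn
      have h2 := pvNewtonStep n x s hn hx hs0 hsn
      rw [← hy] at h2
      exact h2
    · next hyx =>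
      have hxy : x ≤ y := by omega
      refine ⟨hx, ?_, ?_⟩
      · have h3 : x ≤ PySem.Int.floordiv (x + PySem.Int.floordiv n x) 2 := hy ▸ hxy
        rw [PySem.Int.le_floordiv_iff_mul_le (by norm_num)] at h3
        have h4 : x ≤ PySem.Int.floordiv n x := by omega
        have hq := PySem.Int.floordiv_mul_add_mod n x
        have hq1 : 0 ≤ PySem.Int.mod n x := PySem.Int.mod_nonneg n (by omega)
        nlinarith [mul_le_mul_of_nonneg_right h4 (by omega : (0:Int) ≤ x)]
      · by_contra hc
        push_neg at hc
        have := hinv (x + 1) (by omega) hc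
        omega

theorem pvIsqrt_correct (n : Int) (hn : 1 ≤ n) :
    1 ≤ altIsqrt n ∧ altIsqrt n * altIsqrt n ≤ n ∧ n < (altIsqrt n + 1) * (altIsqrt n + 1) := by
  rw [altIsqrt, if_neg (by omega : ¬ n = 0)]
  have hnn : PySem.Int.floordiv n n = 1 := by
    rw [PySem.Int.floordiv_eq_iff_of_pos (by omega)]
    constructor <;> nlinarith
  exact pvNewtonLoop_correct n hn n.toNat n _ (le_refl _) hn (by rw [hnn])
    (fun s hs0 hsn => by nlinarith [sq_nonneg (s - 1)])

-- B's root candidate l0 = (t - ⌊√disc⌋) // 2 + 1 wins, and l0 - 2 does not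
theorem pvLspec (t d s l0 : Int) (ht : 2 ≤ t)
    (hphalf : PySem.Int.floordiv t 2 * (t - PySem.Int.floordiv t 2) > d)
    (hs1 : 1 ≤ s) (hs2 : s * s ≤ t * t - 4 * d) (hs3 : t * t - 4 * d < (s + 1) * (s + 1))
    (hl0 : l0 = PySem.Int.floordiv (t - s) 2 + 1) :
    l0 * (t - l0) > d ∧ (l0 - 2) * (t - (l0 - 2)) ≤ d := by
  have hh := pvFd2 t
  have hk := pvFd2 (t - s)
  constructor
  · rcases (by omega : s = 1 ∨ 2 ≤ s) with hs | hs
    · subst hs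
      rcases (by omega : 2 * l0 - t = 0 ∨ 2 * l0 - t = 1) with hu | hu
      · nlinarith
      · have hodd : t = 2 * PySem.Int.floordiv t 2 + 1 := by omega
        nlinarith [hphalf]
    · nlinarith [mul_nonneg (by omega : (0:Int) ≤ (2 * l0 - t) - (1 - s))
        (by omega : (0:Int) ≤ (2 - s) - (2 * l0 - t))]
  · nlinarith [mul_nonneg (by omega : (0:Int) ≤ -(2 * l0 - 4 - t) - (s + 2))
      (by omega : (0:Int) ≤ -(2 * l0 - 4 - t) + (s + 2))]

-- ===== VERDICT (by name: the statement is the Claim_ definition above) =====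
theorem with_binary_search_spec : Claim_equal_with_binary_search := by
  unfold Claim_equal_with_binary_search
  intro t d _
  unfold Spec_with_binary_search
  have hA : with_binary_search t d =
      (wbsLoop1 t d (t - 1).toNat 1 t, wbsLoop2 t d (t - 1).toNat 1 t) := rfl
  rw [hA]
  simp only [with_binary_search_alt]
  by_cases ht : t ≤ 1
  · rw [if_pos ht, show (t - 1).toNat = 0 from by omega]
    simp only [wbsLoop1, wbsLoop2]
  · rw [if_neg ht]
    push_neg at ht
    have hh := pvFd2 t
    set half := PySem.Int.floordiv t 2 with hhalfdef
    have hh1 : 1 ≤ half := by omega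
    by_cases hemp : half * (t - half) ≤ d
    · rw [if_pos hemp]
      have hall : ∀ m : Int, m * (t - m) ≤ d :=
        fun m => le_trans (pvMaxAtHalf t half m (by omega) (by omega)) hemp
      rw [pvLoop1_allFalse t d hall _ 1 t (by omega) (by omega),
        pvLoop2_allFalse t d hall _ 1 t (by omega) (by omega)]
    · rw [if_neg hemp]
      push_neg at hemp
      have hdisc1 : 1 ≤ t * t - 4 * d := by nlinarith [sq_nonneg (2 * half - t)]
      obtain ⟨hs1, hs2, hs3⟩ := pvIsqrt_correct (t * t - 4 * d) hdisc1
      set s := altIsqrt (t * t - 4 * d) with hsdef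
      obtain ⟨hpl0, hnpl0⟩ := pvLspec t d s (PySem.Int.floordiv (t - s) 2 + 1) ht hemp hs1 hs2 hs3 rfl
      set l0 := PySem.Int.floordiv (t - s) 2 + 1 with hl0def
      set l := if (l0 - 1) * (t - l0 + 1) > d then l0 - 1 else l0 with hldef
      have hpl : l * (t - l) > d := by
        rw [hldef]; split
        · next h => nlinarith [h]
        · exact hpl0
      have hnpl : (l - 1) * (t - (l - 1)) ≤ d := by
        rw [hldef]; split
        · next h => nlinarith [hnpl0]
        · next h => push_neg at h; nlinarith [h]
      have hcenter : 2 * l ≤ t := by nlinarith [hpl, hnpl]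
      have hmid0 : PySem.Int.floordiv (t + 1) 2 = t - half := by
        have := pvFd2 (t + 1); omega
      have hpmid0 : (t - half) * (t - (t - half)) > d := by nlinarith [hemp]
      obtain ⟨g, hg⟩ : ∃ g, (t - 1).toNat = g + 1 := ⟨(t - 1).toNat - 1, by omega⟩
      rw [hg]
      by_cases hl1 : 1 ≤ l
      · -- the winning region is [l, t-l]; A returns (l, t-l+1)
        have hlow : ∀ m : Int, m < l → m * (t - m) ≤ d := by
          intro m hm
          nlinarith [hnpl, mul_nonneg (by omega : (0:Int) ≤ l - 1 - m)
            (by omega : (0:Int) ≤ t - l + 1 - m)]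
        have hhigh : ∀ m : Int, t - l < m → m * (t - m) ≤ d := by
          intro m hm
          nlinarith [hnpl, mul_nonneg (by omega : (0:Int) ≤ m - (t - l + 1))
            (by omega : (0:Int) ≤ m - (l - 1))]
        have hA1 : wbsLoop1 t d (g + 1) 1 t = l := by
          simp only [wbsLoop1]
          rw [if_pos (by omega : (1:Int) < t), hmid0, if_pos hpmid0]
          exact pvLoop1_inv t d l hpl hl1 hlow g 1 (t - half) (by omega) (by omega) (by omega)
            hpmid0 (by intro m h1 h2; omega)
        have hA2 : wbsLoop2 t d (g + 1) 1 t = t - l + 1 := by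
          simp only [wbsLoop2]
          rw [if_pos (by omega : (1:Int) < t), hmid0, if_pos hpmid0]
          apply pvLoop2_inv t d l hpl hl1 hhigh g (t - half + 1) t (by omega) (by omega) (by omega)
          · have he : t - half + 1 - 1 = t - half := by ring
            rw [he]; exact hpmid0
          · intro m h1 h2
            have hmt : m = t := by omega
            subst hmt
            nlinarith [hnpl]
        rw [hA1, hA2]
        rw [show (if l > 1 then l else 1) = l from by split <;> omega,
          show (if t - l + 1 < t then t - l + 1 else t) = t - l + 1 from by split <;> omega]
      · -- l ≤ 0: every mid in [1, t) wins; A returns (1, t)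
        push_neg at hl1
        have hd0 : d < 0 := by
          have hln : l * (t - l) ≤ 0 := mul_nonpos_iff.2 (Or.inr ⟨by omega, by omega⟩)
          omega
        have hall : ∀ m : Int, 1 ≤ m → m < t → m * (t - m) > d := by
          intro m h1 h2
          nlinarith [mul_pos (by omega : (0:Int) < m) (by omega : (0:Int) < t - m)]
        rw [pvLoop1_allTrue t d _ 1 t (by omega) (by omega) hall,
          pvLoop2_allTrue t d _ 1 t (by omega) (by omega) hall]
        rw [show (if l > 1 then l else 1) = 1 from by split <;> omega,
          show (if t - l + 1 < t then t - l + 1 else t) = t from by split <;> omega]
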